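-- pv_equiv track=rewrite | github.com/T9404/EGE | Python/ЕГЭ2021;2022/14/Решение заданий. Поляков/3668.py | f
-- ===== SOURCE A (Python) =====
-- def f(number, foundation):
--     number_found = ''
--
--     while number:
--         number_found += str(number % foundation)
--         number //= foundation
--
--     d = [str(i) * 2 for i in range(foundation)]
--     for i in d:
--         if i in number_found:
--             return False
--
--     return True
-- ===== SOURCE B (Python) =====
-- def f(number, foundation):
--     s = ''
--     while number:
--         s += str(number % foundation)
--         number //= foundation
--
--     if foundation <= 0:
--         return True
--     top = str(foundation - 1)          # decimal numeral of the largest digit of the base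
--     m = len(top)
--     for j in range(len(s)):
--         for L in range(1, m + 1):
--             block = s[j:j + L]
--             if (s[j + L:j + 2 * L] == block
--                     and (L == 1 or not block.startswith('0'))
--                     and (L < m or block <= top)):
--                 return False
--     return True
-- ===== Notes on version B (the rewrite author's own statement) =====
-- stated objective: faster
-- what changed: Instead of materialising all `foundation` doubled patterns str(i)*2 and running a separate substring search for each, B scans the built digit string once and, at each position, recognises a doubled numeral block purely by string comparison against top = str(foundation-1) (length and lexicographic order), so no per-digit pattern list is built.
import Mathlib
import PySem

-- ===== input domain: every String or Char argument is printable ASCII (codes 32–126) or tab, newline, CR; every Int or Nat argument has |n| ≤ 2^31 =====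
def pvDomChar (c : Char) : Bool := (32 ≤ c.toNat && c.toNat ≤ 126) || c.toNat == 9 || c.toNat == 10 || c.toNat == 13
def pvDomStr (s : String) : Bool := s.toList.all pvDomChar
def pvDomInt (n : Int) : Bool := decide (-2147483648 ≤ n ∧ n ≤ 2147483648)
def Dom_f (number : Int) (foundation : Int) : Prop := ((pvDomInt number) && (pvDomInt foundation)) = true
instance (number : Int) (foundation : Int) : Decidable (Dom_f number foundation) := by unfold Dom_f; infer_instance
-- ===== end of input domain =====

-- B replaces A's per-pattern substring searches over all `foundation` doubled patterns str(i)*2 by one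
-- scan of the built string that recognises a doubled numeral block < foundation by string comparison
-- (length and lexicographic order against top = str(foundation-1)), never building the pattern list.

-- ===== PORT A =====
-- the `while number:` loop; fuel (number.natAbs + 2) exceeds the number of iterations on every input where
-- the Python loop terminates (the guard only totalizes the recursion, it does not change the algorithm)
def fLoop (foundation : Int) : Int → List Char → Nat → List Char
  | _, acc, 0 => acc
  | n, acc, fuel + 1 =>
    if n = 0 then acc
    else fLoop foundation (PySem.Int.floordiv n foundation)
      (acc ++ PySem.Int.toChars (PySem.Int.mod n foundation)) fuel

def f (number : Int) (foundation : Int) : Bool :=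
  let numberFound := fLoop foundation number [] (number.natAbs + 2)
  let d := (PySem.List.pyRange 0 foundation 1).map
    (fun i => PySem.Int.toChars i ++ PySem.Int.toChars i)
  if d.any (fun i => PySem.Chars.isIn i numberFound) then false else true

-- ===== PORT B =====
-- B's copy of the base-conversion loop (identical in Source B), same fuel guard
def bLoop (foundation : Int) : Int → List Char → Nat → List Char
  | _, acc, 0 => acc
  | n, acc, fuel + 1 =>
    if n = 0 then acc
    else bLoop foundation (PySem.Int.floordiv n foundation)
      (acc ++ PySem.Int.toChars (PySem.Int.mod n foundation)) fuel

-- `block <= top` on Python strings is ¬ (top < block), lexicographic on code points (= Lean's < on List Char)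
def f_alt (number : Int) (foundation : Int) : Bool :=
  let s := bLoop foundation number [] (number.natAbs + 2)
  if foundation ≤ 0 then true
  else
    let top := PySem.Int.toChars (foundation - 1)
    let m := PySem.List.len top
    !((PySem.List.pyRange 0 (PySem.List.len s) 1).any fun j =>
      (PySem.List.pyRange 1 (m + 1) 1).any fun L =>
        let block := PySem.List.slice s (some j) (some (j + L))
        (PySem.List.slice s (some (j + L)) (some (j + 2 * L)) == block) &&
          (L == 1 || !PySem.Chars.startswith block ['0']) &&
          (decide (L < m) || !PySem.Chars.strLt top block))

-- ===== PRECONDITION & SPEC =====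
-- Pre_f excludes exactly the inputs on which the Python A does not return: foundation = 0 with number ≠ 0
-- raises ZeroDivisionError, and the while loop diverges for foundation ∈ {-1, 1} with number ≠ 0 and for
-- negative number with positive foundation (number then never reaches 0).
def Pre_f (number : Int) (foundation : Int) : Prop :=
  number = 0 ∨ (0 < number ∧ 2 ≤ foundation) ∨ foundation ≤ -2
instance (number : Int) (foundation : Int) : Decidable (Pre_f number foundation) := by
  unfold Pre_f; infer_instance

def pvWitness_f : Int × Int := (19, 2)

def Spec_f (number : Int) (foundation : Int) (out : Bool) : Prop := out = f_alt number foundation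
instance (number : Int) (foundation : Int) (out : Bool) : Decidable (Spec_f number foundation out) := by
  unfold Spec_f; infer_instance

-- ===== CLAIM (what is proved, stated in full; the proofs are below) =====
def Claim_equal_f : Prop := ∀ (number : Int) (foundation : Int), Dom_f number foundation → Pre_f number foundation → Spec_f number foundation (f number foundation)

-- ===== LEMMAS AND PROOFS =====

theorem bLoop_eq_fLoop (foundation n : Int) (acc : List Char) (fuel : Nat) :
    bLoop foundation n acc fuel = fLoop foundation n acc fuel := by
  induction fuel generalizing n acc with
  | zero => rfl
  | succ k ih => simp only [bLoop, fLoop]; split <;> simp [ih]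

-- big-endian decimal digits of a natural number
def digs (n : Nat) : List Char :=
  if _h : n < 10 then [Nat.digitChar n]
  else digs (n / 10) ++ [Nat.digitChar (n % 10)]
  decreasing_by exact Nat.div_lt_self (by omega) (by norm_num)

theorem digs_lt {n : Nat} (h : n < 10) : digs n = [Nat.digitChar n] := by
  rw [digs]; simp [h]

theorem digs_ge {n : Nat} (h : ¬ n < 10) :
    digs n = digs (n / 10) ++ [Nat.digitChar (n % 10)] := by
  rw [digs]; simp [h]

theorem digitChar_isdigit {k : Nat} (h : k < 10) :
    PySem.Chars.isdigit (Nat.digitChar k) = true := by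
  interval_cases k <;> decide

theorem digitChar_toNat {k : Nat} (h : k < 10) : (Nat.digitChar k).toNat = 48 + k := by
  interval_cases k <;> decide

theorem digs_ne_nil (n : Nat) : digs n ≠ [] := by
  rw [digs]; split <;> simp

theorem digs_all_digit (n : Nat) : ∀ c ∈ digs n, PySem.Chars.isdigit c = true := by
  induction n using digs.induct with
  | case1 n h =>
    rw [digs_lt h]
    intro c hc; simp at hc; subst hc; exact digitChar_isdigit h
  | case2 n h ih =>
    rw [digs_ge h]
    intro c hc
    rcases List.mem_append.1 hc with hc | hc
    · exact ih c hc
    · simp at hc; subst hc; exact digitChar_isdigit (Nat.mod_lt _ (by norm_num))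

theorem toDigitsCore_eq_digs (fuel : Nat) :
    ∀ (n : Nat) (ds : List Char), 0 < fuel → n < 10 ^ fuel →
      Nat.toDigitsCore 10 fuel n ds = digs n ++ ds := by
  induction fuel with
  | zero => omega
  | succ k ih =>
    intro n ds _ hlt
    rw [Nat.toDigitsCore]
    by_cases h10 : n / 10 = 0
    · have hn : n < 10 := by omega
      rw [if_pos h10, digs_lt hn, Nat.mod_eq_of_lt hn]
      simp
    · have hn : ¬ n < 10 := by omega
      rw [if_neg h10]
      have hk : 0 < k := by
        by_contra hk0
        have hk1 : k = 0 := by omega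
        subst hk1; simp at hlt; omega
      have hlt' : n / 10 < 10 ^ k := by
        rw [Nat.div_lt_iff_lt_mul (by norm_num : 0 < 10)]
        calc n < 10 ^ (k + 1) := hlt
        _ = 10 ^ k * 10 := pow_succ 10 k
      rw [ih (n / 10) _ hk hlt', digs_ge hn]
      simp

theorem toDigits_eq_digs (n : Nat) : Nat.toDigits 10 n = digs n := by
  have h : n < 10 ^ (n + 1) := by
    calc n < 10 ^ n := Nat.lt_pow_self (by norm_num)
    _ ≤ 10 ^ (n + 1) := Nat.pow_le_pow_right (by norm_num) (by omega)
  simpa using toDigitsCore_eq_digs (n + 1) n [] (by omega) h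

theorem toChars_of_nonneg {i : Int} (h : 0 ≤ i) : PySem.Int.toChars i = digs i.toNat := by
  rw [PySem.Int.toChars, if_neg (by omega), toDigits_eq_digs]

theorem digs_len_mono : ∀ m n : Nat, n ≤ m → (digs n).length ≤ (digs m).length := by
  intro m
  induction m using Nat.strong_induction_on with
  | _ m ih =>
    intro n hnm
    by_cases hm : m < 10
    · rw [digs_lt (show n < 10 by omega), digs_lt hm]
      simp
    · by_cases hn : n < 10
      · rw [digs_lt hn]
        have := List.length_pos_of_ne_nil (digs_ne_nil m)
        simp; omega
      · rw [digs_ge hn, digs_ge hm]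
        simp only [List.length_append, List.length_cons, List.length_nil]
        have := ih (m / 10) (Nat.div_lt_self (by omega) (by norm_num))
          (n / 10) (Nat.div_le_div_right hnm)
        omega

-- decimal value of a digit string, as Source B's comparisons see it
def natVal (t : List Char) : Nat :=
  t.foldl (fun v c => 10 * v + (c.toNat - 48)) 0

theorem char_eq_of_toNat_eq {c d : Char} (h : c.toNat = d.toNat) : c = d :=
  Char.ext (UInt32.toNat_inj.mp h)

theorem foldl_natVal (t : List Char) (v : Nat) :
    t.foldl (fun v c => 10 * v + (c.toNat - 48)) v = v * 10 ^ t.length + natVal t := by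
  induction t generalizing v with
  | nil => simp [natVal]
  | cons c t ih =>
    simp only [natVal, List.foldl_cons, List.length_cons]
    rw [ih, ih (10 * 0 + (c.toNat - 48)), pow_succ]
    ring

theorem natVal_cons (c : Char) (t : List Char) :
    natVal (c :: t) = (c.toNat - 48) * 10 ^ t.length + natVal t := by
  simp only [natVal, List.foldl_cons]
  rw [foldl_natVal]
  norm_num
  rfl

theorem natVal_digs (n : Nat) : natVal (digs n) = n := by
  induction n using digs.induct with
  | case1 n h =>
    rw [digs_lt h]
    simp [natVal, digitChar_toNat h]
  | case2 n h ih =>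
    rw [digs_ge h]
    unfold natVal
    rw [List.foldl_append]
    have : (digs (n / 10)).foldl (fun v c => 10 * v + (c.toNat - 48)) 0 = natVal (digs (n / 10)) := rfl
    rw [this, ih]
    simp [digitChar_toNat (Nat.mod_lt _ (by norm_num : (0:Nat) < 10))]
    omega

theorem isdigit_toNat {c : Char} (h : PySem.Chars.isdigit c = true) :
    48 ≤ c.toNat ∧ c.toNat ≤ 57 := by
  simp only [PySem.Chars.isdigit, Bool.and_eq_true, decide_eq_true_eq, Char.le_def] at h
  obtain ⟨h1, h2⟩ := h
  constructor
  · exact h1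
  · exact h2

theorem natVal_lt_pow {t : List Char} (h : ∀ c ∈ t, PySem.Chars.isdigit c = true) :
    natVal t < 10 ^ t.length := by
  induction t with
  | nil => simp [natVal]
  | cons c t ih =>
    have hc := isdigit_toNat (h c (by simp))
    have hrec := ih (fun x hx => h x (by simp [hx]))
    rw [natVal_cons]
    simp only [List.length_cons, pow_succ]
    have hdc : c.toNat - 48 ≤ 9 := by omega
    nlinarith [hrec, hdc]

theorem digitChar_of_digit {c : Char} (h : PySem.Chars.isdigit c = true) :
    Nat.digitChar (c.toNat - 48) = c := by
  have hc := isdigit_toNat h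
  have hk : c.toNat - 48 < 10 := by omega
  have ht : (Nat.digitChar (c.toNat - 48)).toNat = c.toNat := by
    rw [digitChar_toNat hk]; omega
  exact char_eq_of_toNat_eq ht

theorem digs_head_ne_zero : ∀ n : Nat, 0 < n → ∀ rest, digs n ≠ '0' :: rest := by
  intro n
  induction n using digs.induct with
  | case1 n h =>
    intro hn rest
    rw [digs_lt h]
    intro heq
    have : Nat.digitChar n = '0' := by injection heq
    interval_cases n <;> simp_all <;> exact absurd this (by decide)
  | case2 n h ih =>
    intro _ rest
    rw [digs_ge h]
    have hpos : 0 < n / 10 := by omega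
    intro heq
    rcases hd : digs (n / 10) with _ | ⟨c, cs⟩
    · exact digs_ne_nil _ hd
    · rw [hd] at heq
      have : c = '0' := by injection heq
      exact ih hpos (cs) (by rw [hd, this])

-- a nonempty digit string without leading zero is the canonical numeral of its value
theorem canon (t : List Char) (hd : ∀ c ∈ t, PySem.Chars.isdigit c = true)
    (hne : t ≠ []) (hz : t.length = 1 ∨ t.head? ≠ some '0') :
    digs (natVal t) = t := by
  induction t using List.reverseRecOn with
  | nil => exact absurd rfl hne
  | append_singleton u c ih =>
    rcases u with _ | ⟨c0, u'⟩
    · -- t = [c]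
      simp only [List.nil_append] at *
      have hc := isdigit_toNat (hd c (by simp))
      have hv : natVal [c] = c.toNat - 48 := by simp [natVal]
      rw [hv, digs_lt (by omega), digitChar_of_digit (hd c (by simp))]
    · -- t = (c0 :: u') ++ [c], head c0 ≠ '0'
      have hlen : ((c0 :: u') ++ [c]).length = u'.length + 2 := by simp
      have hz0 : c0 ≠ '0' := by
        rcases hz with hz | hz
        · rw [hlen] at hz; omega
        · simp at hz; exact hz
      have hdu : ∀ x ∈ c0 :: u', PySem.Chars.isdigit x = true := by
        intro x hx
        apply hd
        simp at hx ⊢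
        tauto
      have hdc := isdigit_toNat (hd c (by simp))
      have hvu1 : 1 ≤ natVal (c0 :: u') := by
        have h0 := isdigit_toNat (hdu c0 (by simp))
        have hne0 : c0.toNat ≠ 48 := by
          intro h48
          exact hz0 (char_eq_of_toNat_eq (by rw [h48]; decide))
        rw [natVal_cons]
        have : 1 ≤ (c0.toNat - 48) := by omega
        have hp : 1 ≤ 10 ^ u'.length := Nat.one_le_pow _ _ (by norm_num)
        nlinarith
      have hvt : natVal ((c0 :: u') ++ [c]) = 10 * natVal (c0 :: u') + (c.toNat - 48) := by
        unfold natVal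
        rw [List.foldl_append]
        simp
      have hge : ¬ natVal ((c0 :: u') ++ [c]) < 10 := by rw [hvt]; omega
      rw [digs_ge hge]
      have hdiv : natVal ((c0 :: u') ++ [c]) / 10 = natVal (c0 :: u') := by
        rw [hvt]; omega
      have hmod : natVal ((c0 :: u') ++ [c]) % 10 = c.toNat - 48 := by
        rw [hvt]; omega
      rw [hdiv, hmod, digitChar_of_digit (hd c (by simp))]
      rw [ih hdu (by simp) (Or.inr (by simp [hz0]))]

theorem char_lt_iff (c d : Char) : c < d ↔ c.toNat < d.toNat := by
  rw [Char.lt_def]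
  exact UInt32.lt_iff_toNat_lt

-- on equal-length digit strings, Python's lexicographic < is numeric <
theorem lex_iff : ∀ (u v : List Char), (∀ c ∈ u, PySem.Chars.isdigit c = true) →
    (∀ c ∈ v, PySem.Chars.isdigit c = true) → u.length = v.length →
    (u < v ↔ natVal u < natVal v) := by
  intro u
  induction u with
  | nil =>
    intro v _ _ hlen
    have : v = [] := List.eq_nil_of_length_eq_zero hlen.symm
    subst this
    simp [natVal]
  | cons c u' ih =>
    intro v hdu hdv hlen
    rcases v with _ | ⟨d, v'⟩
    · simp at hlen
    · have hlen' : u'.length = v'.length := by simpa using hlen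
      have hc := isdigit_toNat (hdu c (by simp))
      have hdn := isdigit_toNat (hdv d (by simp))
      have hvu := natVal_cons c u'
      have hvv := natVal_cons d v'
      have hu' := natVal_lt_pow (t := u') (fun x hx => hdu x (by simp [hx]))
      have hv' := natVal_lt_pow (t := v') (fun x hx => hdv x (by simp [hx]))
      rw [List.cons_lt_cons_iff, hvu, hvv, ← hlen']
      constructor
      · rintro (hlt | ⟨heq, hlt⟩)
        · rw [char_lt_iff] at hlt
          have : c.toNat - 48 + 1 ≤ d.toNat - 48 := by omega
          nlinarith [hu', hv']
        · have heqn : c.toNat = d.toNat := by rw [heq]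
          rw [heqn]
          have := (ih v' (fun x hx => hdu x (by simp [hx]))
            (fun x hx => hdv x (by simp [hx])) hlen').1 hlt
          omega
      · intro hlt
        rcases lt_trichotomy c.toNat d.toNat with h | h | h
        · exact Or.inl ((char_lt_iff c d).2 h)
        · right
          have heq : c = d := char_eq_of_toNat_eq h
          refine ⟨heq, ?_⟩
          apply (ih v' (fun x hx => hdu x (by simp [hx]))
            (fun x hx => hdv x (by simp [hx])) hlen').2
          rw [h] at hlt
          omega
        · exfalso
          have h1 : d.toNat - 48 + 1 ≤ c.toNat - 48 := by omega
          have hv2 : natVal v' < 10 ^ u'.length := by rw [hlen']; exact hv'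
          nlinarith [hu', hv2, h1]

-- a ≤ b for canonical numerals = shorter, or not lexicographically above, the numeral of b
theorem value_le_iff (a b : Nat) (hlen : (digs a).length ≤ (digs b).length) :
    a ≤ b ↔ ((digs a).length < (digs b).length ∨ ¬ digs b < digs a) := by
  rcases Nat.lt_or_ge (digs a).length (digs b).length with h | h
  · constructor
    · intro _; exact Or.inl h
    · intro _
      by_contra hab
      have := digs_len_mono a b (by omega)
      omega
  · have heq : (digs a).length = (digs b).length := by omega
    have hlex := lex_iff (digs b) (digs a) (digs_all_digit b) (digs_all_digit a) heq.symm
    rw [natVal_digs, natVal_digs] at hlex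
    constructor
    · intro hab
      exact Or.inr (fun hlt => absurd (hlex.1 hlt) (by omega))
    · rintro (h' | h')
      · omega
      · by_contra hab
        exact h' (hlex.2 (by omega))

theorem if_bool_not (x : Bool) : (if x = true then false else true) = !x := by
  cases x <;> simp

theorem startswith_zero_iff (c : Char) (cs : List Char) :
    PySem.Chars.startswith (c :: cs) ['0'] = false ↔ c ≠ '0' := by
  simp [PySem.Chars.startswith, List.isPrefixOf]
  constructor
  · intro h he; exact h he.symm
  · intro h he; exact h he.symm

theorem loop_digits (foundation : Int) (hf : 0 < foundation) :
    ∀ (fuel : Nat) (n : Int) (acc : List Char),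
      (∀ c ∈ acc, PySem.Chars.isdigit c = true) →
      ∀ c ∈ bLoop foundation n acc fuel, PySem.Chars.isdigit c = true := by
  intro fuel
  induction fuel with
  | zero => intro n acc hacc; simpa [bLoop] using hacc
  | succ k ih =>
    intro n acc hacc
    simp only [bLoop]
    split
    · exact hacc
    · apply ih
      intro c hc
      rcases List.mem_append.1 hc with h | h
      · exact hacc c h
      · rw [toChars_of_nonneg (PySem.Int.mod_nonneg n hf)] at h
        exact digs_all_digit _ c h

theorem scan_iff (s : List Char) (foundation : Int) (hf : 0 < foundation)
    (hs : ∀ c ∈ s, PySem.Chars.isdigit c = true) :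
    (((PySem.List.pyRange 0 foundation 1).map
        (fun i => PySem.Int.toChars i ++ PySem.Int.toChars i)).any
      (fun i => PySem.Chars.isIn i s))
    = ((PySem.List.pyRange 0 (PySem.List.len s) 1).any fun j =>
      (PySem.List.pyRange 1 (PySem.List.len (PySem.Int.toChars (foundation - 1)) + 1) 1).any fun L =>
        (PySem.List.slice s (some (j + L)) (some (j + 2 * L)) == PySem.List.slice s (some j) (some (j + L))) &&
          ((L == 1) || !PySem.Chars.startswith (PySem.List.slice s (some j) (some (j + L))) ['0']) &&
          (decide (L < PySem.List.len (PySem.Int.toChars (foundation - 1))) ||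
            !PySem.Chars.strLt (PySem.Int.toChars (foundation - 1)) (PySem.List.slice s (some j) (some (j + L))))) := by
  have hb1 : (0:Int) ≤ foundation - 1 := by omega
  set b0 : Nat := (foundation - 1).toNat with hb0
  have htop : PySem.Int.toChars (foundation - 1) = digs b0 := toChars_of_nonneg hb1
  rw [Bool.eq_iff_iff]
  simp only [List.any_eq_true, List.mem_map, PySem.List.mem_pyRange_one,
    PySem.Chars.isIn_iff_infix, Bool.and_eq_true, Bool.or_eq_true, decide_eq_true_eq,
    beq_iff_eq, Bool.not_eq_true', PySem.Chars.strLt, decide_eq_false_iff_not]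
  constructor
  · rintro ⟨p, ⟨i, ⟨hi0, hif⟩, rfl⟩, hinf⟩
    obtain ⟨as, bs, hsplit⟩ := hinf
    set t := PySem.Int.toChars i with ht
    have htd : t = digs i.toNat := toChars_of_nonneg hi0
    have htne : t ≠ [] := by rw [htd]; exact digs_ne_nil _
    have htlen : 0 < t.length := List.length_pos_of_ne_nil htne
    have hdrop : s.drop as.length = t ++ (t ++ bs) := by
      rw [← hsplit, List.append_assoc, List.drop_left, List.append_assoc]
    have h1 : PySem.List.slice s (some (as.length : Int)) (some ((as.length : Int) + (t.length : Int))) = t := by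
      rw [PySem.List.slice_natCast_add, hdrop, List.take_left]
    have h2 : PySem.List.slice s (some ((as.length : Int) + (t.length : Int)))
        (some ((as.length : Int) + 2 * (t.length : Int))) = t := by
      have harith2 : (as.length : Int) + (t.length : Int) = ((as.length + t.length : Nat) : Int) := by
        omega
      have harith : (as.length : Int) + 2 * (t.length : Int)
          = ((as.length + t.length : Nat) : Int) + ((t.length : Nat) : Int) := by push_cast; ring
      rw [harith2, harith, PySem.List.slice_natCast_add, ← List.drop_drop, hdrop,
        List.drop_left, List.take_left]
    have hjs : (as.length : Int) < PySem.List.len s := by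
      rw [PySem.List.len_eq, ← hsplit]
      push_cast [List.length_append]
      omega
    have hitb : i.toNat ≤ b0 := by omega
    have hLm : (t.length : Int) < PySem.List.len (PySem.Int.toChars (foundation - 1)) + 1 := by
      rw [htop, PySem.List.len_eq]
      have hmono := digs_len_mono b0 i.toNat hitb
      rw [htd] at htlen ⊢
      omega
    refine ⟨(as.length : Int), ⟨by positivity, hjs⟩, (t.length : Int),
      ⟨by exact_mod_cast htlen, hLm⟩, ⟨by rw [h1, h2], ?_⟩, ?_⟩
    · -- L = 1 ∨ no leading zero
      by_cases hsmall : i.toNat < 10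
      · left
        rw [htd, digs_lt hsmall]
        simp
      · right
        rw [h1]
        rcases hcons : t with _ | ⟨c, cs⟩
        · exact absurd hcons htne
        · rw [startswith_zero_iff]
          intro hc0
          refine digs_head_ne_zero i.toNat (by omega) cs ?_
          rw [← htd, hcons, hc0]
    · -- length-or-lex value condition
      have hlenle : (digs i.toNat).length ≤ (digs b0).length := digs_len_mono b0 i.toNat hitb
      have := (value_le_iff i.toNat b0 hlenle).1 hitb
      rcases this with h | h
      · left
        rw [htop, PySem.List.len_eq, htd]
        exact_mod_cast h
      · right
        rw [h1, htop, htd]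
        exact h
  · rintro ⟨j, ⟨hj0, hjs⟩, L, ⟨hL1, hLm⟩, ⟨hsl, hLz⟩, hval⟩
    set block := PySem.List.slice s (some j) (some (j + L)) with hB
    have hjj : j = (j.toNat : Int) := by omega
    have hLL : L = (L.toNat : Int) := by omega
    have hB' : block = (s.drop j.toNat).take L.toNat := by
      rw [hB, hjj, hLL, PySem.List.slice_natCast_add]
      simp only [Int.toNat_natCast]
    have hjlen : j.toNat < s.length := by
      rw [PySem.List.len_eq] at hjs; omega
    have hbpos : 0 < block.length := by
      rw [hB']
      simp only [List.length_take, List.length_drop]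
      omega
    have hbne : block ≠ [] := List.ne_nil_of_length_pos hbpos
    have hu : PySem.List.slice s (some (j + L)) (some (j + 2 * L))
        = (s.drop (j.toNat + L.toNat)).take L.toNat := by
      have e1 : j + L = ((j.toNat + L.toNat : Nat) : Int) := by omega
      have e2 : j + 2 * L = ((j.toNat + L.toNat : Nat) : Int) + ((L.toNat : Nat) : Int) := by
        push_cast; omega
      rw [e1, e2, PySem.List.slice_natCast_add]
    have hfull : j.toNat + L.toNat ≤ s.length := by
      by_contra hover
      have hd2 : s.drop (j.toNat + L.toNat) = [] := List.drop_eq_nil_of_le (by omega)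
      rw [hu, hd2] at hsl
      simp at hsl
      exact hbne (by rw [hB, ← hsl])
    have hblen : block.length = L.toNat := by
      rw [hB']
      simp only [List.length_take, List.length_drop]
      omega
    have hbd : ∀ c ∈ block, PySem.Chars.isdigit c = true := by
      intro c hc
      rw [hB] at hc
      exact hs c (PySem.List.mem_of_mem_slice _ _ _ hc)
    have hz : block.length = 1 ∨ block.head? ≠ some '0' := by
      rcases hLz with hLz | hLz
      · left; rw [hblen, hLz]; rfl
      · right
        rcases hcons : block with _ | ⟨c, cs⟩
        · exact absurd hcons hbne
        · rw [hcons] at hLz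
          have := (startswith_zero_iff c cs).1 hLz
          simp [this]
    have hcanon : digs (natVal block) = block := canon block hbd hbne hz
    set a : Nat := natVal block with ha
    have hLtop : L.toNat ≤ (digs b0).length := by
      rw [htop, PySem.List.len_eq] at hLm
      omega
    have hlenle : (digs a).length ≤ (digs b0).length := by
      rw [hcanon, hblen]; exact hLtop
    have hab : a ≤ b0 := by
      apply (value_le_iff a b0 hlenle).2
      rcases hval with h | h
      · left
        rw [htop, PySem.List.len_eq] at h
        rw [hcanon, hblen]
        omega
      · right
        rw [hcanon, ← htop]
        exact h
    refine ⟨PySem.Int.toChars (a : Int) ++ PySem.Int.toChars (a : Int),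
      ⟨(a : Int), ⟨by positivity, by omega⟩, rfl⟩, ?_⟩
    have htA : PySem.Int.toChars (a : Int) = block := by
      rw [toChars_of_nonneg (by positivity), Int.toNat_natCast, hcanon]
    rw [htA]
    have hslice : PySem.List.slice s (some (j + L)) (some (j + 2 * L)) = block := by
      rw [hB] at hsl; exact hsl
    refine ⟨s.take j.toNat, s.drop (j.toNat + L.toNat + L.toNat), ?_⟩
    have step1 : block ++ s.drop (j.toNat + L.toNat + L.toNat) = s.drop (j.toNat + L.toNat) := by
      conv_rhs => rw [← List.take_append_drop L.toNat (s.drop (j.toNat + L.toNat))]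
      rw [List.drop_drop, ← hu, hslice]
    have step2 : block ++ (block ++ s.drop (j.toNat + L.toNat + L.toNat)) = s.drop j.toNat := by
      rw [step1]
      conv_rhs => rw [← List.take_append_drop L.toNat (s.drop j.toNat)]
      rw [List.drop_drop, ← hB']
    rw [List.append_assoc, List.append_assoc block block, step2, List.take_append_drop]

-- ===== VERDICT (by name: the statement is the Claim_ definition above) =====
theorem f_spec : Claim_equal_f := by
  intro number foundation _ hpre
  show f number foundation = f_alt number foundation
  unfold f f_alt
  by_cases hf : foundation ≤ 0
  · rw [if_pos hf, PySem.List.pyRange_one_eq_nil hf]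
    simp
  · have hfpos : 0 < foundation := by omega
    rw [if_neg hf]
    have hdig : ∀ c ∈ bLoop foundation number [] (number.natAbs + 2), PySem.Chars.isdigit c = true :=
      loop_digits foundation hfpos _ number [] (by simp)
    rw [bLoop_eq_fLoop] at hdig
    simp only [bLoop_eq_fLoop]
    rw [scan_iff _ foundation hfpos hdig]
    exact if_bool_not _
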